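-- pv_equiv track=rewrite | github.com/ncl-icb-analytics/dbt-OLIDS | scripts/fix_yml_spacing_clean.py | fix_line_spacing
-- ===== SOURCE A (Python) =====
-- def fix_line_spacing(description: str) -> str:
--     """
--     Fix line spacing by removing all empty lines and adding them back only before colons.
--
--     Args:
--         description (str): Original description with spacing issues
--
--     Returns:
--         str: Description with clean spacing
--     """
--     if not description:
--         return description
--
--     # Split into lines and remove all empty lines first
--     lines = description.split('\n')
--     non_empty_lines = [line.rstrip() for line in lines if line.strip()]
--
--     # Now add empty lines back before lines with colons
--     processed_lines = []
--
--     for i, line in enumerate(non_empty_lines):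
--         # Add empty line before lines with colons (except the first line)
--         if ':' in line and i > 0:
--             processed_lines.append('')
--
--         processed_lines.append(line)
--
--     # Join back together and clean up
--     result = '\n'.join(processed_lines)
--     result = result.strip()
--
--     return result
-- ===== SOURCE B (Python) =====
-- def fix_line_spacing(description: str) -> str:
--     """Block-partition rewrite: group kept lines into blocks that start at
--     colon lines, then join blocks with a blank line between them."""
--     blocks = []
--     for line in description.split('\n'):
--         if not line.strip():
--             continue
--         line = line.rstrip()
--         if blocks and ':' not in line:
--             blocks[-1].append(line)
--         else:
--             blocks.append([line])
--     return '\n\n'.join('\n'.join(b) for b in blocks).strip()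
-- ===== Notes on version B (the rewrite author's own statement) =====
-- stated objective: simpler
-- what changed: Replaces A's enumerate-indexed loop that inserts empty sentinel lines before colon lines and then joins with single newlines by partitioning the kept lines into blocks starting at colon lines and joining the blocks with a blank line between them.
import Mathlib
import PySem

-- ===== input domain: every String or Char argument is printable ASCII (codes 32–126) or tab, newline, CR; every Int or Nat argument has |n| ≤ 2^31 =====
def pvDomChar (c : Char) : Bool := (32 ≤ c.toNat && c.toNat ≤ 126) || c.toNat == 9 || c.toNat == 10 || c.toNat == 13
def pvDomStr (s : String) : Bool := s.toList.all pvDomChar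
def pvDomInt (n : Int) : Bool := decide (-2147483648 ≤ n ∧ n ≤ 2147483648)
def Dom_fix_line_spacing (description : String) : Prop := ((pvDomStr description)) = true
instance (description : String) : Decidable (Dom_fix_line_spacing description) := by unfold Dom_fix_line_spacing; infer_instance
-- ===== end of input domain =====

-- B replaces A's index-tracking loop with blank-sentinel insertion by a block
-- partition (new block at each colon line) joined with "\n\n" (objective: simpler).

-- ===== PORT A =====
-- the loop body of A: append '' before the line when it contains ':' and i > 0
def aStep (acc : List (List Char)) (p : Int × List Char) : List (List Char) :=
  (if PySem.Chars.isIn [':'] p.2 && decide (0 < p.1) then acc ++ [([] : List Char)] else acc) ++ [p.2]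

def fix_line_spacing (description : String) : String :=
  if description == "" then description
  else
    let lines := PySem.Chars.splitOn description.toList ['\n']
    let non_empty_lines :=
      (lines.filter (fun l => !(PySem.Chars.strip l == []))).map PySem.Chars.rstrip
    let processed_lines := (PySem.List.enumerate non_empty_lines).foldl aStep []
    String.ofList (PySem.Chars.strip (PySem.Chars.join ['\n'] processed_lines))

-- ===== PORT B =====
-- inner branch of B's loop: start a new block, or extend the last one
def bExtend (blocks : List (List (List Char))) (line : List Char) : List (List (List Char)) :=
  if !blocks.isEmpty && !PySem.Chars.isIn [':'] line then
    blocks.dropLast ++ [blocks.getLast! ++ [line]]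
  else
    blocks ++ [[line]]

-- full loop body of B: skip blank lines, rstrip, then place the line
def bStep (blocks : List (List (List Char))) (line : List Char) : List (List (List Char)) :=
  if PySem.Chars.strip line == [] then blocks
  else bExtend blocks (PySem.Chars.rstrip line)

def fix_line_spacing_alt (description : String) : String :=
  let blocks := (PySem.Chars.splitOn description.toList ['\n']).foldl bStep []
  String.ofList (PySem.Chars.strip
    (PySem.Chars.join ['\n', '\n'] (blocks.map (PySem.Chars.join ['\n']))))

-- ===== PRECONDITION & SPEC =====
def Spec_fix_line_spacing (description : String) (out : String) : Prop := out = fix_line_spacing_alt description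
instance (description : String) (out : String) : Decidable (Spec_fix_line_spacing description out) := by unfold Spec_fix_line_spacing; infer_instance

-- ===== CLAIM (what is proved, stated in full; the proofs are below) =====
def Claim_equal_fix_line_spacing : Prop := ∀ (description : String), Dom_fix_line_spacing description → Spec_fix_line_spacing description (fix_line_spacing description)

-- ===== LEMMAS AND PROOFS =====

-- the contribution of one non-first line in A's processed list
def stepA (k : List Char) : List (List Char) :=
  if PySem.Chars.isIn [':'] k then [[], k] else [k]

-- the text appended per non-first line in the joined result
def stepJ (k : List Char) : List Char :=
  (if PySem.Chars.isIn [':'] k then ['\n', '\n'] else ['\n']) ++ k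

theorem stepA_ne (k : List Char) : stepA k ≠ [] := by
  unfold stepA; split <;> simp

theorem getLast!_concat' (bs : List (List (List Char))) (b : List (List Char)) :
    (bs ++ [b]).getLast! = b := by
  cases bs with
  | nil => rfl
  | cons a t => simp [List.getLast!]

theorem join_concat (sep x : List Char) (xs : List (List Char)) (hx : xs ≠ []) :
    PySem.Chars.join sep (xs ++ [x]) = PySem.Chars.join sep xs ++ sep ++ x := by
  induction xs with
  | nil => exact absurd rfl hx
  | cons a t ih =>
    cases t with
    | nil => simp [PySem.Chars.join_cons_cons, PySem.Chars.join_singleton]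
    | cons b u =>
      have h1 : (a :: b :: u) ++ [x] = a :: ((b :: u) ++ [x]) := by simp
      rw [h1, show (b :: u) ++ [x] = b :: (u ++ [x]) from rfl,
          PySem.Chars.join_cons_cons,
          show b :: (u ++ [x]) = (b :: u) ++ [x] from rfl,
          ih (by simp), PySem.Chars.join_cons_cons]
      simp [List.append_assoc]

theorem join_concat_append (sep x y : List Char) (xs : List (List Char)) :
    PySem.Chars.join sep (xs ++ [x ++ y]) = PySem.Chars.join sep (xs ++ [x]) ++ y := by
  cases xs with
  | nil => simp [PySem.Chars.join_singleton]
  | cons a t =>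
    rw [join_concat _ _ _ (by simp), join_concat _ _ _ (by simp)]
    simp [List.append_assoc]

-- A's loop over the enumerated tail (all indices ≥ 1) is a flatMap of stepA
theorem foldA_tail (rest : List (List Char)) :
    ∀ (s : Int), 1 ≤ s → ∀ (acc : List (List Char)),
    (PySem.List.enumerate rest s).foldl aStep acc = acc ++ rest.flatMap stepA := by
  induction rest with
  | nil => intro s _ acc; simp [PySem.List.enumerate]
  | cons r t ih =>
    intro s hs acc
    rw [PySem.List.enumerate_cons, List.foldl_cons, ih (s + 1) (by omega)]
    have hpos : decide (0 < s) = true := by simp; omega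
    unfold aStep stepA
    cases h : PySem.Chars.isIn [':'] r <;> simp [h, hpos]

-- joining A's processed list: a head block plus one stepJ chunk per further line
theorem joinA (rest : List (List Char)) :
    ∀ (xs : List (List Char)), xs ≠ [] →
    PySem.Chars.join ['\n'] (xs ++ rest.flatMap stepA)
      = PySem.Chars.join ['\n'] xs ++ rest.flatMap stepJ := by
  induction rest with
  | nil => intro xs _; simp
  | cons r t ih =>
    intro xs hx
    have h1 : xs ++ (r :: t).flatMap stepA = (xs ++ stepA r) ++ t.flatMap stepA := by
      simp [List.flatMap_cons, List.append_assoc]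
    rw [h1, ih (xs ++ stepA r) (by simp [stepA_ne r])]
    have h2 : PySem.Chars.join ['\n'] (xs ++ stepA r)
        = PySem.Chars.join ['\n'] xs ++ stepJ r := by
      unfold stepA stepJ
      cases h : PySem.Chars.isIn [':'] r
      · simpa [h] using join_concat ['\n'] r xs hx
      · have e1 : xs ++ [[], r] = (xs ++ [([] : List Char)]) ++ [r] := by simp
        rw [if_pos rfl, if_pos rfl, e1, join_concat _ _ _ (by simp),
            join_concat _ _ _ hx]
        simp [List.append_assoc]
    rw [h2, List.flatMap_cons, List.append_assoc]

-- one bExtend step on a non-empty block list, by the colon test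
theorem bExtend_ext (bs : List (List (List Char))) (b : List (List Char)) (r : List Char)
    (h : PySem.Chars.isIn [':'] r = false) :
    bExtend (bs ++ [b]) r = bs ++ [b ++ [r]] := by
  unfold bExtend
  rw [if_pos (by simp [h])]
  rw [List.dropLast_concat, getLast!_concat']

theorem bExtend_new (bs : List (List (List Char))) (b : List (List Char)) (r : List Char)
    (h : PySem.Chars.isIn [':'] r = true) :
    bExtend (bs ++ [b]) r = (bs ++ [b]) ++ [[r]] := by
  unfold bExtend
  rw [if_neg (by simp [h])]

-- joining B's blocks after folding the tail: same head plus the same chunks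
theorem joinB (rest : List (List Char)) :
    ∀ (bs : List (List (List Char))) (b : List (List Char)), b ≠ [] →
    PySem.Chars.join ['\n', '\n']
        ((rest.foldl bExtend (bs ++ [b])).map (PySem.Chars.join ['\n']))
      = PySem.Chars.join ['\n', '\n'] ((bs ++ [b]).map (PySem.Chars.join ['\n']))
        ++ rest.flatMap stepJ := by
  induction rest with
  | nil => intro bs b _; simp
  | cons r t ih =>
    intro bs b hb
    rw [List.foldl_cons]
    cases h : PySem.Chars.isIn [':'] r
    · rw [bExtend_ext bs b r h, ih bs (b ++ [r]) (by simp)]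
      have h3 : PySem.Chars.join ['\n', '\n'] ((bs ++ [b ++ [r]]).map (PySem.Chars.join ['\n']))
          = PySem.Chars.join ['\n', '\n'] ((bs ++ [b]).map (PySem.Chars.join ['\n'])) ++ stepJ r := by
        rw [List.map_append, List.map_append]
        simp only [List.map_cons, List.map_nil]
        rw [join_concat ['\n'] r b hb,
            List.append_assoc (PySem.Chars.join ['\n'] b) ['\n'] r,
            join_concat_append, stepJ, h]
        simp
      rw [h3, List.flatMap_cons, List.append_assoc]
    · rw [bExtend_new bs b r h, ih (bs ++ [b]) [r] (by simp)]
      have h3 : PySem.Chars.join ['\n', '\n'] (((bs ++ [b]) ++ [[r]]).map (PySem.Chars.join ['\n']))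
          = PySem.Chars.join ['\n', '\n'] ((bs ++ [b]).map (PySem.Chars.join ['\n'])) ++ stepJ r := by
        rw [List.map_append]
        simp only [List.map_cons, List.map_nil, PySem.Chars.join_singleton]
        rw [join_concat _ _ _ (by simp), stepJ, h]
        simp [List.append_assoc]
      rw [h3, List.flatMap_cons, List.append_assoc]

-- B's loop over raw lines = B's placement loop over the kept, rstripped lines
theorem foldB_filter (lines : List (List Char)) :
    ∀ (bs : List (List (List Char))),
    lines.foldl bStep bs
      = (((lines.filter (fun l => !(PySem.Chars.strip l == []))).map PySem.Chars.rstrip)).foldl bExtend bs := by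
  induction lines with
  | nil => intro bs; rfl
  | cons l t ih =>
    intro bs
    rw [List.foldl_cons, List.filter_cons]
    cases h : (PySem.Chars.strip l == []) with
    | true =>
      have hl : PySem.Chars.strip l = [] := by simpa using h
      rw [show bStep bs l = bs from by simp [bStep, hl]]
      rw [if_neg (by simp)]
      exact ih bs
    | false =>
      have hl : ¬ PySem.Chars.strip l = [] := by simpa using h
      rw [show bStep bs l = bExtend bs (PySem.Chars.rstrip l) from by simp [bStep, hl]]
      rw [if_pos (by simp), List.map_cons, List.foldl_cons]
      exact ih _

-- the two joined bodies agree for every list of kept lines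
theorem core (ks : List (List Char)) :
    PySem.Chars.join ['\n'] ((PySem.List.enumerate ks).foldl aStep [])
      = PySem.Chars.join ['\n', '\n'] ((ks.foldl bExtend []).map (PySem.Chars.join ['\n'])) := by
  cases ks with
  | nil => rfl
  | cons k rest =>
    rw [PySem.List.enumerate_cons, List.foldl_cons, List.foldl_cons]
    have ha : aStep [] (0, k) = [k] := by simp [aStep]
    have hb : bExtend [] k = [[k]] := by simp [bExtend]
    rw [ha, hb, foldA_tail rest (0 + 1) (by omega) [k],
        joinA rest [k] (by simp),
        show ([[k]] : List (List (List Char))) = [] ++ [[k]] from rfl,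
        joinB rest [] [k] (by simp)]
    simp [PySem.Chars.join_singleton]

theorem main_eq (description : String) :
    fix_line_spacing description = fix_line_spacing_alt description := by
  by_cases h : description = ""
  · subst h; rfl
  · simp only [fix_line_spacing, fix_line_spacing_alt]
    rw [if_neg (by simpa using h)]
    rw [foldB_filter, core]

-- ===== VERDICT (by name: the statement is the Claim_ definition above) =====
theorem fix_line_spacing_spec : Claim_equal_fix_line_spacing := by
  intro description _
  unfold Spec_fix_line_spacing
  exact main_eq description
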